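-- pv_equiv track=rewrite | github.com/17r4f33d/problem-solving | python/even-odd-fibonacci-sum.py | even_odd_fibonacci
-- ===== SOURCE A (Python) =====
-- def even_odd_fibonacci(start_inclusive, end_inclusive):
--     prev_prev = 0
--     prev = 1
--     even_sum = 0
--     odd_sum = 0
--     count = 1
--     while prev <= end_inclusive:
--         if prev >= start_inclusive:
--             if prev % 2 == 0:
--                 even_sum += prev
--             else:
--                 odd_sum += prev
--         nextt = prev_prev + prev
--         prev_prev = prev
--         prev = nextt
--         count += 1
--     return even_sum, odd_sum, count
-- ===== SOURCE B (Python) =====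
-- def even_odd_fibonacci(start_inclusive, end_inclusive):
--     terms = []
--     a, b = 1, 1
--     while a <= end_inclusive:
--         terms.append(a)
--         a, b = b, a + b
--     even_sum = sum(t for t in terms if t >= start_inclusive and t % 2 == 0)
--     odd_sum = sum(t for t in terms if t >= start_inclusive and t % 2 != 0)
--     return even_sum, odd_sum, len(terms) + 1
-- ===== Notes on version B (the rewrite author's own statement) =====
-- stated objective: alternative
-- what changed: B separates term generation from aggregation: it first builds the list of Fibonacci terms not exceeding end_inclusive, then computes the even and odd sums as two filtered passes over the list and takes count as len(terms)+1, instead of A's single while loop accumulating all three counters in place.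
import Mathlib
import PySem

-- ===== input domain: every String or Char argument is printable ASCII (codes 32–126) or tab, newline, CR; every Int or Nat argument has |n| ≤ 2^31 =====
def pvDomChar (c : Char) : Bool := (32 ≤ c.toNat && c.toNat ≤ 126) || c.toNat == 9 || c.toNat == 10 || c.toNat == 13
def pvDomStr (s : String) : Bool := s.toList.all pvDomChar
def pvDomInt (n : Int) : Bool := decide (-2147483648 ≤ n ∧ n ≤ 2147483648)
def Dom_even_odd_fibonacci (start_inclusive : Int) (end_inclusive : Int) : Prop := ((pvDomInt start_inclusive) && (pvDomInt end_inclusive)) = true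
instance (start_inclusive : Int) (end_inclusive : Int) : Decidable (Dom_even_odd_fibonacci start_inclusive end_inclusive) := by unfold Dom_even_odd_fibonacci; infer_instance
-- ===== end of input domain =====

-- B builds the Fibonacci terms once, then sums even/odd in-range terms in two filtered passes (alternative decomposition, same cost).
-- Both while loops always terminate in Python (the term grows past end_inclusive); the Lean ports use a fuel of 100,
-- which exceeds the number of iterations for every end_inclusive with |end_inclusive| ≤ 2^31 (fib index 47 > 2^31), so the ports are exact on Dom.

-- ===== PORT A =====
def pvLoopA (fuel : Nat) (pp p es os c s e : Int) : Int × Int × Int :=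
  match fuel with
  | 0 => (es, os, c)
  | n+1 =>
    if p ≤ e then
      let (es', os') :=
        if s ≤ p then
          (if p % 2 = 0 then (es + p, os) else (es, os + p))
        else (es, os)
      pvLoopA n p (pp + p) es' os' (c + 1) s e
    else (es, os, c)

def even_odd_fibonacci (start_inclusive : Int) (end_inclusive : Int) : Int × Int × Int :=
  pvLoopA 100 0 1 0 0 1 start_inclusive end_inclusive

-- ===== PORT B =====
def pvFibTerms (fuel : Nat) (a b e : Int) : List Int :=
  match fuel with
  | 0 => []
  | n+1 => if a ≤ e then a :: pvFibTerms n b (a + b) e else []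

def even_odd_fibonacci_alt (start_inclusive : Int) (end_inclusive : Int) : Int × Int × Int :=
  let terms := pvFibTerms 100 1 1 end_inclusive
  let even_sum := (terms.filter (fun t => start_inclusive ≤ t && t % 2 == 0)).sum
  let odd_sum := (terms.filter (fun t => start_inclusive ≤ t && !(t % 2 == 0))).sum
  (even_sum, odd_sum, (terms.length : Int) + 1)

-- ===== PRECONDITION & SPEC =====
def Spec_even_odd_fibonacci (start_inclusive : Int) (end_inclusive : Int) (out : Int × Int × Int) : Prop := out = even_odd_fibonacci_alt start_inclusive end_inclusive
instance (start_inclusive : Int) (end_inclusive : Int) (out : Int × Int × Int) : Decidable (Spec_even_odd_fibonacci start_inclusive end_inclusive out) := by unfold Spec_even_odd_fibonacci; infer_instance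

-- ===== CLAIM (what is proved, stated in full; the proofs are below) =====
def Claim_equal_even_odd_fibonacci : Prop := ∀ (start_inclusive : Int) (end_inclusive : Int), Dom_even_odd_fibonacci start_inclusive end_inclusive → Spec_even_odd_fibonacci start_inclusive end_inclusive (even_odd_fibonacci start_inclusive end_inclusive)

-- ===== LEMMAS AND PROOFS =====

-- ===== VERDICT (by name: the statement is the Claim_ definition above) =====
lemma pvLoop_eq (fuel : Nat) (pp p es os c s e : Int) :
    pvLoopA fuel pp p es os c s e =
      (es + ((pvFibTerms fuel p (pp + p) e).filter (fun t => s ≤ t && t % 2 == 0)).sum,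
       os + ((pvFibTerms fuel p (pp + p) e).filter (fun t => s ≤ t && !(t % 2 == 0))).sum,
       c + ((pvFibTerms fuel p (pp + p) e).length : Int)) := by
  induction fuel generalizing pp p es os c with
  | zero => simp [pvLoopA, pvFibTerms]
  | succ n ih =>
    simp only [pvLoopA, pvFibTerms]
    by_cases hpe : p ≤ e
    · simp only [if_pos hpe]
      by_cases hsp : s ≤ p
      · by_cases h2 : p % 2 = 0
        · simp [ih, hsp, h2]
          omega
        · simp [ih, hsp, h2]
          omega
      · simp [ih, hsp]
        omega
    · simp [if_neg hpe]

theorem even_odd_fibonacci_spec : Claim_equal_even_odd_fibonacci := by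
  intro s e _
  unfold Spec_even_odd_fibonacci even_odd_fibonacci even_odd_fibonacci_alt
  rw [pvLoop_eq]
  norm_num
  ring
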